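-- pv_equiv track=rewrite | github.com/akhilkarra/python-lab | src/cmu/15112/sudoku-term-project/solveMiniSudoku.py | isSolvedSudoku
-- ===== SOURCE A (Python) =====
-- def isSolvedSudoku(grid):
--     if not isLegalSudoku(grid):
--         return False
--     else:
--         rows, cols = len(grid), len(grid[0])
--         for row in range(rows):
--             for col in range(cols):
--                 if grid[row][col] == 0:
--                     return False
--         return True
--
-- def isLegalSudoku(grid):
--     rows, cols = len(grid), len(grid[0])
--     if rows != 4 and rows != 9:
--         return False
--     if rows != cols:
--         return False
--     for row in range(rows):
--         if not isLegalRow(grid, row):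
--             return False
--     for col in range(cols):
--         if not isLegalCol(grid, col):
--             return False
--     blocks = rows
--     for block in range(blocks):
--         if not isLegalBlock(grid, block):
--             return False
--     return True
--
-- def isLegalRow(grid, row):
--     return areLegalValues(grid[row])
--
-- def isLegalCol(grid, col):
--     columnList = [grid[row][col] for row in range(len(grid))]
--     return areLegalValues(columnList)
--
-- def isLegalBlock(grid, block):
--     n = len(grid)
--     blockSize = round(n ** 0.5)
--     startRow = block // blockSize * blockSize
--     startCol = block % blockSize * blockSize
--     values = []
--     for drow in range(blockSize):
--         for dcol in range(blockSize):
--             row, col = startRow + drow, startCol + dcol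
--             values.append(grid[row][col])
--     return areLegalValues(values)
--
-- def areLegalValues(L):
--     n = len(L)
--     seen = set()
--     for value in L:
--         if not isinstance(value, int):
--             return False
--         if value < 0 or value > n:
--             return False
--         if value != 0 and value in seen:
--             return False
--         seen.add(value)
--     return True
-- ===== SOURCE B (Python) =====
-- def isSolvedSudoku(grid):
--     n = len(grid)
--     if (n != 4 and n != 9) or len(grid[0]) != n:
--         return False
--     b = 2 if n == 4 else 3
--     target = set(range(1, n + 1))
--     regions = [set(row) for row in grid]
--     regions += [{grid[r][c] for r in range(n)} for c in range(n)]
--     regions += [{grid[br + dr][bc + dc] for dr in range(b) for dc in range(b)}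
--                 for br in range(0, n, b) for bc in range(0, n, b)]
--     return all(s == target for s in regions)
-- ===== Notes on version B (the rewrite author's own statement) =====
-- stated objective: idiomatic
-- what changed: A runs four separate passes (row legality, column legality, block legality, then a zero scan) through five helper functions with a per-element seen-set loop; B validates dimensions once, builds the 3n regions as value sets, and returns whether every region's set equals set(range(1,n+1)), collapsing legality and completeness into one set-equality test per region.
-- outside the precondition, e.g. on isSolvedSudoku([[1, 2, 3, 4], [1, 2], [1, 2, 3, 4], [1, 2, 3, 4]]): A returns False, B raises IndexError
import Mathlib
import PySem

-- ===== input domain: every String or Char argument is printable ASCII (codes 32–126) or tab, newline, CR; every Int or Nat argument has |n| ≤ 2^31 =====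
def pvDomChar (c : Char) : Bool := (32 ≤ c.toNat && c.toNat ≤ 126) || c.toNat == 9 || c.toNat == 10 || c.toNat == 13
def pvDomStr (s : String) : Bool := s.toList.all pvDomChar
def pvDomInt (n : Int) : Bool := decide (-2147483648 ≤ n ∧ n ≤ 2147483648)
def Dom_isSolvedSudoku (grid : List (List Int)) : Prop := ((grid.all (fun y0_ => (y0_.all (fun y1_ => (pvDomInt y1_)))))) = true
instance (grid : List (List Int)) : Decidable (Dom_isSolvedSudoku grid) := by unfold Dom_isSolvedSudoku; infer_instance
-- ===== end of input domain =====

-- B replaces A's four separate passes (row/col/block legality via a seen-set loop, then a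
-- zero scan) by one set-equality test per region against set(range(1, n+1)); same cost,
-- more idiomatic ("alternative", not faster).


-- ===== PORT A =====
def areLegalLoop (n : Int) (seen : PySem.Set Int) : List Int → Bool
  | [] => true
  | v :: rest =>
      if v < 0 ∨ n < v then false
      else if v ≠ 0 ∧ v ∈ seen then false
      else areLegalLoop n (PySem.Set.add seen v) rest

def areLegalValues (L : List Int) : Bool :=
  areLegalLoop (L.length : Int) PySem.Set.empty L

def isLegalRow (grid : List (List Int)) (row : Int) : Bool :=
  areLegalValues (PySem.List.pyGetD grid row [])

def isLegalCol (grid : List (List Int)) (col : Int) : Bool :=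
  areLegalValues ((PySem.List.pyRange 0 (grid.length : Int) 1).map
    (fun row => PySem.List.pyGetD (PySem.List.pyGetD grid row []) col 0))

def isLegalBlock (grid : List (List Int)) (block : Int) : Bool :=
  let blockSize : Int := if (grid.length : Int) = 4 then 2 else 3
  let startRow := PySem.Int.floordiv block blockSize * blockSize
  let startCol := PySem.Int.mod block blockSize * blockSize
  areLegalValues ((PySem.List.pyRange 0 blockSize 1).foldl (fun acc drow =>
      (PySem.List.pyRange 0 blockSize 1).foldl (fun acc2 dcol =>
        acc2 ++ [PySem.List.pyGetD (PySem.List.pyGetD grid (startRow + drow) [])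
          (startCol + dcol) 0]) acc) [])

def isLegalSudoku (grid : List (List Int)) : Bool :=
  let rows : Int := (grid.length : Int)
  let cols : Int := ((grid.headD []).length : Int)
  if rows ≠ 4 ∧ rows ≠ 9 then false
  else if rows ≠ cols then false
  else if ¬ ((PySem.List.pyRange 0 rows 1).all (fun row => isLegalRow grid row)) = true then false
  else if ¬ ((PySem.List.pyRange 0 cols 1).all (fun col => isLegalCol grid col)) = true then false
  else if ¬ ((PySem.List.pyRange 0 rows 1).all (fun block => isLegalBlock grid block)) = true then false
  else true

def isSolvedSudoku (grid : List (List Int)) : Bool :=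
  if ¬ (isLegalSudoku grid = true) then false
  else
    (PySem.List.pyRange 0 (grid.length : Int) 1).all (fun row =>
      (PySem.List.pyRange 0 ((grid.headD []).length : Int) 1).all (fun col =>
        !(PySem.List.pyGetD (PySem.List.pyGetD grid row []) col 0 == 0)))

-- ===== PORT B =====
def isSolvedSudoku_alt (grid : List (List Int)) : Bool :=
  let n := grid.length
  if (n ≠ 4 ∧ n ≠ 9) ∨ (grid.headD []).length ≠ n then false
  else
    let b : Int := if n = 4 then 2 else 3
    let target : PySem.Set Int := PySem.Set.ofList (PySem.List.pyRange 1 ((n : Int) + 1) 1)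
    let rowSets := grid.map (fun row => PySem.Set.ofList row)
    let colSets := (PySem.List.pyRange 0 (n : Int) 1).map (fun c =>
      PySem.Set.ofList ((PySem.List.pyRange 0 (n : Int) 1).map (fun r =>
        PySem.List.pyGetD (PySem.List.pyGetD grid r []) c 0)))
    let blockSets := (PySem.List.pyRange 0 (n : Int) b).flatMap (fun br =>
      (PySem.List.pyRange 0 (n : Int) b).map (fun bc =>
        PySem.Set.ofList ((PySem.List.pyRange 0 b 1).flatMap (fun dr =>
          (PySem.List.pyRange 0 b 1).map (fun dc =>
            PySem.List.pyGetD (PySem.List.pyGetD grid (br + dr) []) (bc + dc) 0)))))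
    (rowSets ++ colSets ++ blockSets).all (fun s => PySem.Set.equal s target)

-- ===== PRECONDITION & SPEC =====
-- Pre_ excludes the empty grid (A raises IndexError on grid[0]) and grids that pass the
-- dimension check but have ragged rows, on which A either raises IndexError in the column
-- scan or returns False depending on row contents (and B raises IndexError building columns).
def Pre_isSolvedSudoku (grid : List (List Int)) : Prop :=
  grid ≠ [] ∧ ((grid.length = 4 ∨ grid.length = 9) ∧ (grid.headD []).length = grid.length →
    ∀ row ∈ grid, row.length = grid.length)

instance (grid : List (List Int)) : Decidable (Pre_isSolvedSudoku grid) := by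
  unfold Pre_isSolvedSudoku; infer_instance

def pvWitness_isSolvedSudoku : List (List Int) :=
  [[1, 2, 3, 4], [3, 4, 1, 2], [2, 1, 4, 3], [4, 3, 2, 1]]

def Spec_isSolvedSudoku (grid : List (List Int)) (out : Bool) : Prop := out = isSolvedSudoku_alt grid
instance (grid : List (List Int)) (out : Bool) : Decidable (Spec_isSolvedSudoku grid out) := by unfold Spec_isSolvedSudoku; infer_instance

-- ===== CLAIM (what is proved, stated in full; the proofs are below) =====
def Claim_equal_isSolvedSudoku : Prop := ∀ (grid : List (List Int)), Dom_isSolvedSudoku grid → Pre_isSolvedSudoku grid → Spec_isSolvedSudoku grid (isSolvedSudoku grid)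

-- ===== LEMMAS AND PROOFS =====
theorem areLegalLoop_iff (n : Int) (L : List Int) (s : PySem.Set Int) :
    areLegalLoop n s L = true ↔
      (∀ v ∈ L, 0 ≤ v ∧ v ≤ n) ∧ (L.filter (fun v => v ≠ 0)).Nodup ∧
        (∀ v ∈ L, v ≠ 0 → v ∉ s) := by
  induction L generalizing s with
  | nil => simp [areLegalLoop]
  | cons v rest ih =>
    rw [areLegalLoop]
    split_ifs with hb hs
    · constructor
      · rintro ⟨⟩
      · rintro ⟨hbd, -⟩; have := hbd v (by simp); omega
    · constructor
      · rintro ⟨⟩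
      · rintro ⟨-, -, hns⟩; exact (hns v (by simp) hs.1) hs.2
    · rw [ih]
      push_neg at hb
      by_cases hv0 : v = 0
      · subst hv0
        simp only [List.mem_cons, List.filter_cons, forall_eq_or_imp, PySem.Set.mem_add]
        norm_num
        constructor
        · rintro ⟨h1, h2, h3⟩
          exact ⟨⟨hb.2, h1⟩, h2, fun a ha ha0 => (h3 a ha ha0).1⟩
        · rintro ⟨⟨-, h1⟩, h2, h3⟩
          exact ⟨h1, h2, fun a ha ha0 => ⟨h3 a ha ha0, ha0⟩⟩
      · have hvs : v ∉ s := fun h => hs ⟨hv0, h⟩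
        simp only [List.mem_cons, List.filter_cons, forall_eq_or_imp, PySem.Set.mem_add]
        rw [if_pos (by simpa using hv0)]
        simp only [List.nodup_cons, List.mem_filter, decide_eq_true_eq]
        constructor
        · rintro ⟨h1, h2, h3⟩
          have h3' : ∀ a ∈ rest, a ≠ 0 → a ∉ s ∧ a ≠ v := by
            intro a ha ha0
            have := h3 a ha ha0; push_neg at this; exact this
          exact ⟨⟨hb, h1⟩, ⟨fun hc => (h3' v hc.1 hv0).2 rfl, h2⟩, fun _ => hvs,
            fun a ha ha0 => (h3' a ha ha0).1⟩
        · rintro ⟨⟨-, h1⟩, ⟨hnf, h2⟩, -, h3⟩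
          refine ⟨h1, h2, fun a ha ha0 hmem => ?_⟩
          rcases hmem with h | h
          · exact h3 a ha ha0 h
          · exact hnf (h ▸ ⟨ha, ha0⟩)

theorem areLegalValues_iff (L : List Int) :
    areLegalValues L = true ↔
      (∀ v ∈ L, 0 ≤ v ∧ v ≤ (L.length : Int)) ∧ (L.filter (fun v => v ≠ 0)).Nodup := by
  rw [areLegalValues, areLegalLoop_iff]
  simp [PySem.Set.empty]

theorem good_iff (L : List Int) (n : Nat) (hL : L.length = n) :
    (PySem.Set.equal (PySem.Set.ofList L)
        (PySem.Set.ofList (PySem.List.pyRange 1 ((n : Int) + 1) 1)) = true)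
    ↔ (areLegalValues L = true ∧ ∀ v ∈ L, v ≠ 0) := by
  rw [PySem.Set.equal_iff]
  simp only [PySem.Set.mem_ofList, PySem.List.mem_pyRange_one]
  rw [areLegalValues_iff]
  constructor
  · intro h
    have hbd : ∀ v ∈ L, 1 ≤ v ∧ v < (n : Int) + 1 := fun v hv => (h v).mp hv
    have hnz : ∀ v ∈ L, v ≠ 0 := fun v hv => by have := hbd v hv; omega
    have hnodup : L.Nodup := by
      have hfs : L.toFinset = Finset.Icc (1 : Int) (n : Int) := by
        ext x
        rw [List.mem_toFinset, Finset.mem_Icc, h x]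
        omega
      have hcard : L.toFinset.card = L.length := by
        rw [hfs, Int.card_Icc, hL]; omega
      rw [List.card_toFinset] at hcard
      exact List.dedup_eq_self.mp ((L.dedup_sublist).eq_of_length hcard)
    refine ⟨⟨fun v hv => by have := hbd v hv; rw [hL]; omega, ?_⟩, hnz⟩
    rwa [List.filter_eq_self.mpr (fun v hv => by simpa using hnz v hv)]
  · rintro ⟨⟨hbd, hnd⟩, hnz⟩
    have hnodup : L.Nodup := by
      rwa [List.filter_eq_self.mpr (fun v hv => by simpa using hnz v hv)] at hnd
    have hsub : L.toFinset ⊆ Finset.Icc (1 : Int) (n : Int) := by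
      intro x hx; rw [List.mem_toFinset] at hx
      have h1 := hbd x hx; have h2 := hnz x hx
      rw [hL] at h1; rw [Finset.mem_Icc]; omega
    have hcard : (Finset.Icc (1 : Int) (n : Int)).card ≤ L.toFinset.card := by
      rw [Int.card_Icc, List.card_toFinset, List.dedup_eq_self.mpr hnodup, hL]; omega
    have heq : L.toFinset = Finset.Icc 1 (n : Int) := Finset.eq_of_subset_of_card_le hsub hcard
    intro x
    constructor
    · intro hx
      have h1 := hbd x hx; have h2 := hnz x hx; rw [hL] at h1; omega
    · intro hx
      have : x ∈ L.toFinset := heq ▸ (Finset.mem_Icc.mpr ⟨hx.1, by omega⟩)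
      exact List.mem_toFinset.mp this

-- cell access: grid[r][c] with both indices in [0, n)
theorem cell_mem (grid : List (List Int)) (n : Nat) (hn : grid.length = n)
    (hrect : ∀ row ∈ grid, row.length = n) {r c : Int}
    (hr0 : 0 ≤ r) (hrn : r < (n : Int)) (hc0 : 0 ≤ c) (hcn : c < (n : Int)) :
    ∃ row ∈ grid, PySem.List.pyGetD (PySem.List.pyGetD grid r []) c 0 ∈ row := by
  have hrl : r < (grid.length : Int) := by rw [hn]; exact hrn
  rw [PySem.List.pyGetD_eq_getElem grid [] hr0 hrl]
  have hrow : grid[r.toNat] ∈ grid := List.getElem_mem _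
  have hlen : grid[r.toNat].length = n := hrect _ hrow
  have hcl : c < (grid[r.toNat].length : Int) := by rw [hlen]; exact hcn
  rw [PySem.List.pyGetD_eq_getElem _ 0 hc0 hcl]
  exact ⟨grid[r.toNat], hrow, List.getElem_mem _⟩

theorem mem_cell (grid : List (List Int)) (n : Nat) (hn : grid.length = n)
    (hrect : ∀ row ∈ grid, row.length = n) {row : List Int} {v : Int}
    (hrow : row ∈ grid) (hv : v ∈ row) :
    ∃ r c : Int, (0 ≤ r ∧ r < (n : Int)) ∧ (0 ≤ c ∧ c < (n : Int)) ∧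
      PySem.List.pyGetD (PySem.List.pyGetD grid r []) c 0 = v := by
  obtain ⟨i, hi, hieq⟩ := List.mem_iff_getElem.mp hrow
  obtain ⟨j, hj, hjeq⟩ := List.mem_iff_getElem.mp hv
  refine ⟨(i : Int), (j : Int), ⟨by positivity, ?_⟩, ⟨by positivity, ?_⟩, ?_⟩
  · exact_mod_cast hn ▸ hi
  · have : j < n := by rw [← hrect row hrow]; exact hj
    exact_mod_cast this
  · rw [PySem.List.pyGetD_natCast grid i [], List.getD_eq_getElem _ _ hi, hieq,
      PySem.List.pyGetD_natCast, List.getD_eq_getElem _ _ hj, hjeq]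

-- row via index
theorem row_eq (grid : List (List Int)) {r : Int} (hr0 : 0 ≤ r) (hrn : r < (grid.length : Int)) :
    PySem.List.pyGetD grid r [] = grid[r.toNat] :=
  PySem.List.pyGetD_eq_getElem grid [] hr0 hrn

theorem blk_index_bound {n bs x d : Int} (hbs : 0 < bs) (hn : n = bs * bs)
    (hx : x ∈ PySem.List.pyRange 0 n bs) (hd : d ∈ PySem.List.pyRange 0 bs 1) :
    0 ≤ x + d ∧ x + d < n := by
  rw [PySem.List.mem_pyRange_iff_of_pos hbs] at hx
  rw [PySem.List.mem_pyRange_one] at hd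
  obtain ⟨hx0, hxn, i, hi⟩ := hx
  have hx' : x = bs * i := by omega
  have hi0 : 0 ≤ i := nonneg_of_mul_nonneg_right (by omega : 0 ≤ bs * i) hbs
  have hilt : i < bs := by
    have : bs * i < bs * bs := by rw [← hx', ← hn]; omega
    exact lt_of_mul_lt_mul_left this (le_of_lt hbs)
  have h2 : bs * i + bs = bs * (i + 1) := by ring
  have h3 : bs * (i + 1) ≤ bs * bs := by
    apply mul_le_mul_of_nonneg_left (by omega) (le_of_lt hbs)
  constructor
  · omega
  · have : x + d < bs * i + bs := by omega
    omega

theorem block_bridge (n bs : Int) (hbs : 0 < bs) (hn : n = bs * bs) (P : Int → Int → Prop) :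
    (∀ k, 0 ≤ k → k < n →
        P (PySem.Int.floordiv k bs * bs) (PySem.Int.mod k bs * bs)) ↔
      (∀ br ∈ PySem.List.pyRange 0 n bs, ∀ bc ∈ PySem.List.pyRange 0 n bs, P br bc) := by
  constructor
  · intro h br hbr bc hbc
    rw [PySem.List.mem_pyRange_iff_of_pos hbs] at hbr hbc
    obtain ⟨hbr0, hbrn, i, hi⟩ := hbr
    obtain ⟨hbc0, hbcn, j, hj⟩ := hbc
    have hcomi : bs * i = i * bs := mul_comm bs i
    have hcomj : bs * j = j * bs := mul_comm bs j
    have hbr' : br = i * bs := by omega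
    have hbc' : bc = j * bs := by omega
    have hi0 : 0 ≤ i := nonneg_of_mul_nonneg_right (by omega : 0 ≤ bs * i) hbs
    have hj0 : 0 ≤ j := nonneg_of_mul_nonneg_right (by omega : 0 ≤ bs * j) hbs
    have hilt : i < bs := by
      have : bs * i < bs * bs := by omega
      exact lt_of_mul_lt_mul_left this (le_of_lt hbs)
    have hjlt : j < bs := by
      have : bs * j < bs * bs := by omega
      exact lt_of_mul_lt_mul_left this (le_of_lt hbs)
    have hk := h (i * bs + j) (by positivity) (by
      have h2 : i * bs + bs ≤ bs * bs := by
        have := mul_le_mul_of_nonneg_right (by omega : i + 1 ≤ bs) (le_of_lt hbs)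
        nlinarith
      omega)
    have hfd : PySem.Int.floordiv (i * bs + j) bs = i := by
      rw [PySem.Int.floordiv_eq_iff_of_pos hbs]
      constructor
      · omega
      · nlinarith
    have hmd : PySem.Int.mod (i * bs + j) bs = j := by
      have := PySem.Int.floordiv_mul_add_mod (i * bs + j) bs
      rw [hfd] at this; omega
    rw [hfd, hmd] at hk
    rw [hbr', hbc']
    exact hk
  · intro h k hk0 hkn
    have hf0 : 0 ≤ PySem.Int.floordiv k bs := by
      rw [PySem.Int.floordiv_eq_ediv_of_pos hbs]
      exact Int.ediv_nonneg hk0 (le_of_lt hbs)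
    have hflt : PySem.Int.floordiv k bs < bs := by
      rw [PySem.Int.floordiv_lt_iff_lt_mul hbs]
      omega
    have hm0 : 0 ≤ PySem.Int.mod k bs := PySem.Int.mod_nonneg k hbs
    have hmlt : PySem.Int.mod k bs < bs := PySem.Int.mod_lt k hbs
    apply h
    · rw [PySem.List.mem_pyRange_iff_of_pos hbs]
      refine ⟨by positivity, ?_, ?_⟩
      · have := mul_lt_mul_of_pos_right hflt hbs
        omega
      · exact ⟨PySem.Int.floordiv k bs, by ring⟩
    · rw [PySem.List.mem_pyRange_iff_of_pos hbs]
      refine ⟨by positivity, ?_, ?_⟩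
      · have := mul_lt_mul_of_pos_right hmlt hbs
        omega
      · exact ⟨PySem.Int.mod k bs, by ring⟩

def blkFor (grid : List (List Int)) (bs : Int) (br bc : Int) : List Int :=
  (PySem.List.pyRange 0 bs 1).flatMap (fun dr =>
    (PySem.List.pyRange 0 bs 1).map (fun dc =>
      PySem.List.pyGetD (PySem.List.pyGetD grid (br + dr) []) (bc + dc) 0))

theorem len_col (grid : List (List Int)) (n : Nat) (c : Int) :
    ((PySem.List.pyRange 0 (n : Int) 1).map
      (fun r => PySem.List.pyGetD (PySem.List.pyGetD grid r []) c 0)).length = n := by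
  simp [PySem.List.length_pyRange_one]

theorem len_blk (grid : List (List Int)) (n bs : Nat) (hnbs : n = bs * bs) (br bc : Int) :
    (blkFor grid (bs : Int) br bc).length = n := by
  simp [blkFor, List.length_flatMap, List.length_map, PySem.List.length_pyRange_one]
  omega

theorem isLegalBlock_eq (grid : List (List Int)) (n bs : Nat)
    (hn : grid.length = n) (hbA : (if (n : Int) = 4 then (2:Int) else 3) = (bs : Int)) (k : Int) :
    isLegalBlock grid k = areLegalValues
      (blkFor grid (bs : Int) (PySem.Int.floordiv k (bs : Int) * (bs : Int))
        (PySem.Int.mod k (bs : Int) * (bs : Int))) := by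
  rw [isLegalBlock]
  simp only [hn, hbA]
  congr 1
  simp only [PySem.List.foldl_append_singleton_eq_map]
  rw [PySem.List.foldl_append_eq_flatMap]
  simp [blkFor]

theorem hLegal_iff (grid : List (List Int)) (n : Nat)
    (hn : grid.length = n) (hcols : (grid.headD []).length = n)
    (h49 : (n : Int) = 4 ∨ (n : Int) = 9) :
    isLegalSudoku grid = true ↔
      ((∀ r ∈ PySem.List.pyRange 0 (n : Int) 1, isLegalRow grid r = true) ∧
       (∀ c ∈ PySem.List.pyRange 0 (n : Int) 1, isLegalCol grid c = true) ∧
       (∀ b ∈ PySem.List.pyRange 0 (n : Int) 1, isLegalBlock grid b = true)) := by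
  have hg1 : ¬((n : Int) ≠ 4 ∧ (n : Int) ≠ 9) := by tauto
  rw [isLegalSudoku]
  simp only [hn, hcols]
  rw [if_neg hg1, if_neg (by simp)]
  split_ifs with h1 h2 h3 <;> simp_all [List.all_eq_true]

theorem hA_iff (grid : List (List Int)) (n : Nat)
    (hn : grid.length = n) (hcols : (grid.headD []).length = n) :
    isSolvedSudoku grid = true ↔
      (isLegalSudoku grid = true ∧
        ∀ r ∈ PySem.List.pyRange 0 (n : Int) 1, ∀ c ∈ PySem.List.pyRange 0 (n : Int) 1,
          PySem.List.pyGetD (PySem.List.pyGetD grid r []) c 0 ≠ 0) := by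
  rw [isSolvedSudoku]
  simp only [hn, hcols]
  split_ifs with h
  · simp [h, List.all_eq_true]
  · constructor
    · intro h'; cases h'
    · rintro ⟨hl, -⟩; exact absurd hl h

theorem hB_iff (grid : List (List Int)) (n bs : Nat)
    (hn : grid.length = n) (hcols : (grid.headD []).length = n)
    (h49 : n = 4 ∨ n = 9)
    (hbB : (if n = 4 then (2:Int) else 3) = (bs : Int)) :
    isSolvedSudoku_alt grid = true ↔
      ((∀ row ∈ grid,
          PySem.Set.equal (PySem.Set.ofList row)
            (PySem.Set.ofList (PySem.List.pyRange 1 ((n : Int) + 1) 1)) = true) ∧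
       (∀ c ∈ PySem.List.pyRange 0 (n : Int) 1,
          PySem.Set.equal (PySem.Set.ofList ((PySem.List.pyRange 0 (n : Int) 1).map
            (fun r => PySem.List.pyGetD (PySem.List.pyGetD grid r []) c 0)))
            (PySem.Set.ofList (PySem.List.pyRange 1 ((n : Int) + 1) 1)) = true) ∧
       (∀ br ∈ PySem.List.pyRange 0 (n : Int) (bs : Int),
          ∀ bc ∈ PySem.List.pyRange 0 (n : Int) (bs : Int),
          PySem.Set.equal (PySem.Set.ofList (blkFor grid (bs : Int) br bc))
            (PySem.Set.ofList (PySem.List.pyRange 1 ((n : Int) + 1) 1)) = true)) := by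
  rw [isSolvedSudoku_alt]
  simp only [hn, hcols, hbB]
  rw [if_neg (show ¬(n ≠ 4 ∧ n ≠ 9 ∨ n ≠ n) by rcases h49 with h | h <;> simp [h])]
  simp only [List.all_append, Bool.and_eq_true, List.all_map, List.all_eq_true, blkFor,
    List.mem_flatMap, List.mem_map, Function.comp]
  constructor
  · rintro ⟨⟨h1, h2⟩, h3⟩
    refine ⟨h1, h2, fun br hbr bc hbc => ?_⟩
    exact h3 _ ⟨br, hbr, ⟨bc, hbc, rfl⟩⟩
  · rintro ⟨h1, h2, h3⟩
    refine ⟨⟨h1, h2⟩, ?_⟩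
    rintro s ⟨br, hbr, bc, hbc, rfl⟩
    exact h3 br hbr bc hbc

theorem good_case_core (grid : List (List Int)) (n bs : Nat)
    (hn : grid.length = n) (hcols : (grid.headD []).length = n)
    (hrect : ∀ row ∈ grid, row.length = n)
    (hnbs : n = bs * bs) (hbspos : 0 < bs)
    (h49 : n = 4 ∨ n = 9)
    (hbA : (if (n : Int) = 4 then (2:Int) else 3) = (bs : Int))
    (hbB : (if n = 4 then (2:Int) else 3) = (bs : Int)) :
    isSolvedSudoku grid = isSolvedSudoku_alt grid := by
  have h49' : (n : Int) = 4 ∨ (n : Int) = 9 := by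
    rcases h49 with h | h
    · exact Or.inl (by exact_mod_cast h)
    · exact Or.inr (by exact_mod_cast h)
  apply Bool.coe_iff_coe.mp
  rw [hA_iff grid n hn hcols, hLegal_iff grid n hn hcols h49', hB_iff grid n bs hn hcols h49 hbB]
  have hnbsI : (n : Int) = (bs : Int) * (bs : Int) := by exact_mod_cast hnbs
  have hbsposI : (0 : Int) < (bs : Int) := by exact_mod_cast hbspos
  constructor
  · rintro ⟨⟨hra, hca, hba⟩, hz⟩
    have hnz : ∀ row ∈ grid, ∀ v ∈ row, v ≠ 0 := by
      intro row hrow v hv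
      obtain ⟨r, c, hr, hc, hcell⟩ := mem_cell grid n hn hrect hrow hv
      have h1 := hz r (PySem.List.mem_pyRange_one.mpr ⟨hr.1, hr.2⟩) c
        (PySem.List.mem_pyRange_one.mpr ⟨hc.1, hc.2⟩)
      rw [hcell] at h1; exact h1
    refine ⟨?_, ?_, ?_⟩
    · intro row hrow
      rw [good_iff row n (hrect row hrow)]
      refine ⟨?_, hnz row hrow⟩
      obtain ⟨i, hi, hieq⟩ := List.mem_iff_getElem.mp hrow
      have h2 := hra (i : Int) (PySem.List.mem_pyRange_one.mpr
        ⟨by positivity, by exact_mod_cast hn ▸ hi⟩)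
      rw [isLegalRow, PySem.List.pyGetD_natCast, List.getD_eq_getElem _ _ hi, hieq] at h2
      exact h2
    · intro c hc
      rw [good_iff _ n (len_col grid n c)]
      constructor
      · have h2 := hca c hc
        rw [isLegalCol, hn] at h2
        exact h2
      · intro v hv
        rw [List.mem_map] at hv
        obtain ⟨r, hr, hveq⟩ := hv
        rw [PySem.List.mem_pyRange_one] at hr hc
        obtain ⟨row, hrow, hvrow⟩ := cell_mem grid n hn hrect hr.1 hr.2 hc.1 hc.2
        rw [hveq] at hvrow
        exact hnz row hrow v hvrow
    · have hbridge := (block_bridge (n : Int) (bs : Int) hbsposI hnbsI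
        (fun br bc => areLegalValues (blkFor grid (bs : Int) br bc) = true)).mp
      have hlhs : ∀ k : Int, 0 ≤ k → k < (n : Int) →
          areLegalValues (blkFor grid (bs : Int)
            (PySem.Int.floordiv k (bs:Int) * (bs:Int))
            (PySem.Int.mod k (bs:Int) * (bs:Int))) = true := by
        intro k hk0 hkn
        have h2 := hba k (PySem.List.mem_pyRange_one.mpr ⟨hk0, hkn⟩)
        rwa [isLegalBlock_eq grid n bs hn hbA k] at h2
      have h3 := hbridge hlhs
      intro br hbr bc hbc
      rw [good_iff _ n (len_blk grid n bs hnbs br bc)]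
      refine ⟨h3 br hbr bc hbc, ?_⟩
      intro v hv
      rw [blkFor, List.mem_flatMap] at hv
      obtain ⟨dr, hdr, hv2⟩ := hv
      rw [List.mem_map] at hv2
      obtain ⟨dc, hdc, hveq⟩ := hv2
      have hb1 := blk_index_bound hbsposI hnbsI hbr hdr
      have hb2 := blk_index_bound hbsposI hnbsI hbc hdc
      obtain ⟨row, hrow, hvrow⟩ := cell_mem grid n hn hrect hb1.1 hb1.2 hb2.1 hb2.2
      rw [hveq] at hvrow
      exact hnz row hrow v hvrow
  · rintro ⟨hrows, hcolsG, hblks⟩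
    have hnz : ∀ row ∈ grid, ∀ v ∈ row, v ≠ 0 := by
      intro row hrow
      exact ((good_iff row n (hrect row hrow)).mp (hrows row hrow)).2
    refine ⟨⟨?_, ?_, ?_⟩, ?_⟩
    · intro r hr
      rw [PySem.List.mem_pyRange_one] at hr
      rw [isLegalRow]
      have hrl : r < (grid.length : Int) := by rw [hn]; exact hr.2
      rw [row_eq grid hr.1 hrl]
      have hrow : grid[r.toNat] ∈ grid := List.getElem_mem _
      exact ((good_iff _ n (hrect _ hrow)).mp (hrows _ hrow)).1
    · intro c hc
      rw [isLegalCol, hn]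
      exact ((good_iff _ n (len_col grid n c)).mp (hcolsG c hc)).1
    · intro k hk
      rw [PySem.List.mem_pyRange_one] at hk
      rw [isLegalBlock_eq grid n bs hn hbA k]
      have h4 := (block_bridge (n:Int) (bs:Int) hbsposI hnbsI
        (fun br bc => areLegalValues (blkFor grid (bs:Int) br bc) = true)).mpr
        (fun br hbr bc hbc =>
          ((good_iff _ n (len_blk grid n bs hnbs br bc)).mp (hblks br hbr bc hbc)).1)
      exact h4 k hk.1 hk.2
    · intro r hr c hc
      rw [PySem.List.mem_pyRange_one] at hr hc
      obtain ⟨row, hrow, hv⟩ := cell_mem grid n hn hrect hr.1 hr.2 hc.1 hc.2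
      exact hnz row hrow _ hv

theorem bad_case_A (grid : List (List Int))
    (h : ¬((grid.length = 4 ∨ grid.length = 9) ∧ (grid.headD []).length = grid.length)) :
    isSolvedSudoku grid = false := by
  have hL : isLegalSudoku grid = false := by
    rw [isLegalSudoku]
    split_ifs with g1 g2 g3 g4 g5 <;> try rfl
    exfalso
    apply h
    constructor
    · rcases not_and_or.mp g1 with h1 | h1
      · exact Or.inl (by exact_mod_cast not_not.mp h1)
      · exact Or.inr (by exact_mod_cast not_not.mp h1)
    · exact_mod_cast (not_not.mp g2).symm
  rw [isSolvedSudoku, hL]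
  simp

theorem bad_case_B (grid : List (List Int))
    (h : ¬((grid.length = 4 ∨ grid.length = 9) ∧ (grid.headD []).length = grid.length)) :
    isSolvedSudoku_alt grid = false := by
  rw [isSolvedSudoku_alt]
  rw [if_pos ?_]
  rcases not_and_or.mp h with h1 | h1
  · left
    push_neg at h1
    exact h1
  · right
    exact h1

theorem main_equiv (grid : List (List Int))
    (hrect : (grid.length = 4 ∨ grid.length = 9) ∧ (grid.headD []).length = grid.length →
      ∀ row ∈ grid, row.length = grid.length) :
    isSolvedSudoku grid = isSolvedSudoku_alt grid := by
  by_cases hdim : (grid.length = 4 ∨ grid.length = 9) ∧ (grid.headD []).length = grid.length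
  · obtain ⟨h49, hcols⟩ := hdim
    have hr := hrect ⟨h49, hcols⟩
    rcases h49 with h4 | h9
    · exact good_case_core grid 4 2 h4 (h4 ▸ hcols) (fun row hrow => h4 ▸ hr row hrow)
        (by norm_num) (by norm_num) (Or.inl rfl) (by norm_num) (by norm_num)
    · exact good_case_core grid 9 3 h9 (h9 ▸ hcols) (fun row hrow => h9 ▸ hr row hrow)
        (by norm_num) (by norm_num) (Or.inr rfl) (by norm_num) (by norm_num)
  · rw [bad_case_A grid hdim, bad_case_B grid hdim]

-- ===== VERDICT (by name: the statement is the Claim_ definition above) =====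
theorem isSolvedSudoku_spec : Claim_equal_isSolvedSudoku := by
  intro grid _ hpre
  show isSolvedSudoku grid = isSolvedSudoku_alt grid
  exact main_equiv grid hpre.2
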